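-- pv_equiv track=rewrite | github.com/Nikhilr-28/sequence_alignment_project | efficient_3.py | compute_costs_backward
-- ===== SOURCE A (Python) =====
-- alpha = {
--     ('A', 'A'): 0, ('A', 'C'): 110, ('A', 'G'): 48, ('A', 'T'): 94,
--     ('C', 'A'): 110, ('C', 'C'): 0, ('C', 'G'): 118, ('C', 'T'): 48,
--     ('G', 'A'): 48, ('G', 'C'): 118, ('G', 'G'): 0, ('G', 'T'): 110,
--     ('T', 'A'): 94, ('T', 'C'): 48, ('T', 'G'): 110, ('T', 'T'): 0
-- }
--
-- delta = 30
--
-- def compute_costs_backward(s1, s2):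
--     """
--     Compute alignment costs from right to left, keeping only current and previous columns
--     """
--     m = len(s1)
--     n = len(s2)
--
--     # Only keep two columns
--     prev_col = [j * delta for j in range(n, -1, -1)]
--     curr_col = [0] * (n + 1)
--
--     for i in range(m - 1, -1, -1):
--         curr_col[n] = (m - i) * delta
--         for j in range(n - 1, -1, -1):
--             match_cost = prev_col[j+1] + alpha[(s1[i], s2[j])]
--             gap_s2 = prev_col[j] + delta
--             gap_s1 = curr_col[j+1] + delta
--             curr_col[j] = min(match_cost, gap_s2, gap_s1)
--         prev_col, curr_col = curr_col, prev_col
--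
--     return prev_col
-- ===== SOURCE B (Python) =====
-- alpha = {
--     ('A', 'A'): 0, ('A', 'C'): 110, ('A', 'G'): 48, ('A', 'T'): 94,
--     ('C', 'A'): 110, ('C', 'C'): 0, ('C', 'G'): 118, ('C', 'T'): 48,
--     ('G', 'A'): 48, ('G', 'C'): 118, ('G', 'G'): 0, ('G', 'T'): 110,
--     ('T', 'A'): 94, ('T', 'C'): 48, ('T', 'G'): 110, ('T', 'T'): 0
-- }
--
-- delta = 30
--
-- def compute_costs_backward(s1, s2):
--     m = len(s1)
--     n = len(s2)
--     # mismatch costs per distinct character of s1, computed once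
--     rows = {c: [alpha[(c, b)] for b in s2] for c in set(s1)}
--     col = [(n - j) * delta for j in range(n + 1)]
--     for i in range(m - 1, -1, -1):
--         row = rows[s1[i]]
--         # phase 1: relax against the previous column only
--         t = [min(up + a, left + delta) for a, left, up in zip(row, col, col[1:])]
--         # phase 2: propagate the within-column gap by a backward scan
--         acc = (m - i) * delta
--         new = [acc]
--         for x in reversed(t):
--             acc = min(x, acc + delta)
--             new.append(acc)
--         col = new[::-1]
--     return col
-- ===== Notes on version B (the rewrite author's own statement) =====
-- stated objective: faster
-- what changed: Replaces the index-mutating two-array inner loop by a two-phase functional column update (a zip/comprehension relaxing against the previous column, then a backward accumulate propagating the within-column gap) over per-character mismatch rows precomputed once per distinct character.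
import Mathlib
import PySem

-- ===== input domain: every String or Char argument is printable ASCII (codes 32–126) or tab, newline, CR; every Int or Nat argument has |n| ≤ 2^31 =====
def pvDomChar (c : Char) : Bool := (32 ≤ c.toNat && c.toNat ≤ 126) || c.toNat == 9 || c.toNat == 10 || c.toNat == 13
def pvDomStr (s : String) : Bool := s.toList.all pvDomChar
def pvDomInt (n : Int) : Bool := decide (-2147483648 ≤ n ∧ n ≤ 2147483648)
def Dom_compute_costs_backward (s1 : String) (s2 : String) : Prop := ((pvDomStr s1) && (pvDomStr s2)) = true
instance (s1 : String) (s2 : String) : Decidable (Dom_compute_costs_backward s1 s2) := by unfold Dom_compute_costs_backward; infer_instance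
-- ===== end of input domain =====

-- B replaces A's index-mutating two-array inner loop by a two-phase functional column
-- update (zip-relaxation against the previous column, then a backward min-accumulate)
-- over per-character mismatch rows precomputed once; measurably faster in Python.


-- shared module-level constants of Source A / Source B
def pvDelta : Int := 30
def pvAlpha : PySem.Dict (Char × Char) Int := PySem.Dict.ofList
  [(('A','A'),0), (('A','C'),110), (('A','G'),48), (('A','T'),94),
   (('C','A'),110), (('C','C'),0), (('C','G'),118), (('C','T'),48),
   (('G','A'),48), (('G','C'),118), (('G','G'),0), (('G','T'),110),
   (('T','A'),94), (('T','C'),48), (('T','G'),110), (('T','T'),0)]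
-- alpha[(a, b)]: KeyError (lookup miss) is excluded by Pre_, so the default 0 is never read there
def pvAlphaGet (a b : Char) : Int := PySem.Dict.getD pvAlpha (a, b) 0

-- ===== PORT A =====
def compute_costs_backward (s1 : String) (s2 : String) : List Int :=
  let l1 := s1.toList
  let l2 := s2.toList
  let m : Int := l1.length
  let n : Int := l2.length
  let prev_col : List Int := (PySem.List.pyRange n (-1) (-1)).map (fun j => j * pvDelta)
  let curr_col : List Int := PySem.List.pyRepeat [0] (n + 1)
  let st := (PySem.List.pyRange (m - 1) (-1) (-1)).foldl
    (fun (st : List Int × List Int) i =>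
      let prev_col := st.1
      let curr_col := st.2
      let curr_col := PySem.List.pySetD curr_col n ((m - i) * pvDelta)
      let curr_col := (PySem.List.pyRange (n - 1) (-1) (-1)).foldl
        (fun (curr_col : List Int) j =>
          let match_cost := PySem.List.pyGetD prev_col (j + 1) 0 +
            pvAlphaGet (PySem.List.pyGetD l1 i ' ') (PySem.List.pyGetD l2 j ' ')
          let gap_s2 := PySem.List.pyGetD prev_col j 0 + pvDelta
          let gap_s1 := PySem.List.pyGetD curr_col (j + 1) 0 + pvDelta
          PySem.List.pySetD curr_col j (min (min match_cost gap_s2) gap_s1)) curr_col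
      (curr_col, prev_col)) (prev_col, curr_col)
  st.1

-- ===== PORT B =====
def compute_costs_backward_alt (s1 : String) (s2 : String) : List Int :=
  let l1 := s1.toList
  let l2 := s2.toList
  let m : Int := l1.length
  let n : Int := l2.length
  let rows : PySem.Dict Char (List Int) :=
    (PySem.Set.ofList l1).foldl
      (fun d c => d.insert c (l2.map (fun b => pvAlphaGet c b))) PySem.Dict.empty
  let col0 : List Int := (PySem.List.pyRange 0 (n + 1) 1).map (fun j => (n - j) * pvDelta)
  (PySem.List.pyRange (m - 1) (-1) (-1)).foldl
    (fun (col : List Int) i =>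
      let row := rows.getD (PySem.List.pyGetD l1 i ' ') []
      let t := (row.zip (col.zip (PySem.List.slice col (some 1) none))).map
        (fun p => min (p.2.2 + p.1) (p.2.1 + pvDelta))
      let s := t.reverse.foldl
        (fun (st : Int × List Int) x =>
          let acc := min x (st.1 + pvDelta)
          (acc, st.2 ++ [acc])) ((m - i) * pvDelta, [(m - i) * pvDelta])
      (PySem.List.slice? s.2 none none (-1)).getD []) col0

-- ===== PRECONDITION & SPEC =====
-- Pre_ excludes exactly the inputs on which Python A raises KeyError: both strings
-- nonempty and some character outside 'ACGT' (then alpha[(s1[i], s2[j])] misses for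
-- some reached index pair). On all other inputs A returns normally.
def Pre_compute_costs_backward (s1 : String) (s2 : String) : Prop :=
  s1.toList = [] ∨ s2.toList = [] ∨
    ((s1.toList ++ s2.toList).all (fun c => c = 'A' ∨ c = 'C' ∨ c = 'G' ∨ c = 'T')) = true
instance (s1 : String) (s2 : String) : Decidable (Pre_compute_costs_backward s1 s2) := by
  unfold Pre_compute_costs_backward; infer_instance
def pvWitness_compute_costs_backward : String × String := ("ACGT", "AG")

def Spec_compute_costs_backward (s1 : String) (s2 : String) (out : List Int) : Prop := out = compute_costs_backward_alt s1 s2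
instance (s1 : String) (s2 : String) (out : List Int) : Decidable (Spec_compute_costs_backward s1 s2 out) := by unfold Spec_compute_costs_backward; infer_instance

-- ===== CLAIM (what is proved, stated in full; the proofs are below) =====
def Claim_equal_compute_costs_backward : Prop := ∀ (s1 : String) (s2 : String), Dom_compute_costs_backward s1 s2 → Pre_compute_costs_backward s1 s2 → Spec_compute_costs_backward s1 s2 (compute_costs_backward s1 s2)

-- ===== LEMMAS AND PROOFS =====

def pvNewCol (c : Char) (base : Int) : List Char → List Int → List Int
  | [], _ => [base]
  | b :: bs, col =>
    let rest := pvNewCol c base bs col.tail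
    min (min (col.tail.headD 0 + pvAlphaGet c b) (col.headD 0 + pvDelta))
        (rest.headD 0 + pvDelta) :: rest

theorem pvNewCol_ne_nil (c : Char) (base : Int) (bs : List Char) (col : List Int) :
    pvNewCol c base bs col ≠ [] := by
  cases bs <;> simp [pvNewCol]



def pvColAll (l2 : List Char) : List Char → List Int
  | [] => (List.range (l2.length + 1)).map (fun (j : Nat) => ((l2.length : Int) - (j : Int)) * pvDelta)
  | a :: s => pvNewCol a (((s.length : Int) + 1) * pvDelta) l2 (pvColAll l2 s)

theorem pvNewCol_length (c : Char) (base : Int) (bs : List Char) (col : List Int) :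
    (pvNewCol c base bs col).length = bs.length + 1 := by
  induction bs generalizing col with
  | nil => simp [pvNewCol]
  | cons b bs ih => simp [pvNewCol, ih]

theorem pvColAll_length (l2 s : List Char) : (pvColAll l2 s).length = l2.length + 1 := by
  cases s with
  | nil => simp [pvColAll]
  | cons a s => simp [pvColAll, pvNewCol_length]

theorem pvHeadD_drop (l : List Int) (n : Nat) (d : Int) : (l.drop n).headD d = l.getD n d := by
  cases hd : l.drop n with
  | nil =>
    have h : l[n]? = none := by rw [← List.head?_drop, hd]; rfl
    simp [List.getD, h]
  | cons a t =>
    have h : l[n]? = some a := by rw [← List.head?_drop, hd]; rfl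
    simp [List.getD, h]

theorem pvInnerA (l2 : List Char) (prev : List Int) (ch : Char) (base : Int)
    (hprev : prev.length = l2.length + 1) :
    ∀ (k : Nat), k ≤ l2.length → ∀ (pre : List Int), pre.length = k →
    (PySem.List.pyRange ((k : Int) - 1) (-1) (-1)).foldl
      (fun (curr_col : List Int) j =>
        let match_cost := PySem.List.pyGetD prev (j + 1) 0 + pvAlphaGet ch (PySem.List.pyGetD l2 j ' ')
        let gap_s2 := PySem.List.pyGetD prev j 0 + pvDelta
        let gap_s1 := PySem.List.pyGetD curr_col (j + 1) 0 + pvDelta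
        PySem.List.pySetD curr_col j (min (min match_cost gap_s2) gap_s1))
      (pre ++ pvNewCol ch base (l2.drop k) (prev.drop k))
    = pvNewCol ch base l2 prev := by
  intro k
  induction k with
  | zero =>
    intro _ pre hpre
    rw [PySem.List.pyRange_neg_one_eq_nil (by norm_num)]
    simp at hpre
    subst hpre
    simp
  | succ k ih =>
    intro hk pre hpre
    have hc1 : ((k + 1 : Nat) : Int) - 1 = (k : Int) := by push_cast; ring
    rw [hc1, PySem.List.pyRange_neg_one_cons (by omega)]
    rw [List.foldl_cons]
    have hkl : k < l2.length := by omega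
    have hk1p : k + 1 < prev.length := by omega
    have hTail : pvNewCol ch base (l2.drop (k+1)) (prev.drop (k+1)) ≠ [] := pvNewCol_ne_nil _ _ _ _
    set tail := pvNewCol ch base (l2.drop (k+1)) (prev.drop (k+1)) with htail
    have hstate : ∀ v : Int, PySem.List.pySetD (pre ++ tail) (k : Int) v
        = pre.take k ++ v :: tail := by
      intro v
      rw [PySem.List.pySetD_natCast, List.set_append_left _ _ (by omega),
          List.set_eq_take_cons_drop v (by omega)]
      have hnil : pre.drop (k + 1) = [] := by
        apply List.drop_eq_nil_of_le; omega
      simp [hnil]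
    have hget1 : PySem.List.pyGetD prev ((k : Int) + 1) 0 = prev.getD (k+1) 0 := by
      have h : (k : Int) + 1 = ((k + 1 : Nat) : Int) := by push_cast; ring
      rw [h, PySem.List.pyGetD_natCast]
    have hget2 : PySem.List.pyGetD prev (k : Int) 0 = prev.getD k 0 := PySem.List.pyGetD_natCast ..
    have hgetc : PySem.List.pyGetD l2 (k : Int) ' ' = l2.getD k ' ' := PySem.List.pyGetD_natCast ..
    have hget3 : PySem.List.pyGetD (pre ++ tail) ((k : Int) + 1) 0 = tail.headD 0 := by
      have h : (k : Int) + 1 = ((k + 1 : Nat) : Int) := by push_cast; ring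
      rw [h, PySem.List.pyGetD_natCast]
      have h1 : (pre ++ tail).getD (k+1) 0 = tail.getD 0 0 := by
        rw [← hpre]; simp [List.getD, List.getElem?_append_right]
      rw [h1]
      cases h2 : tail with
      | nil => exact absurd h2 hTail
      | cons a t => simp [List.getD]
    simp only [hget1, hget2, hgetc, hget3, hstate]
    have hcons : (min (min (prev.getD (k+1) 0 + pvAlphaGet ch (l2.getD k ' ')) (prev.getD k 0 + pvDelta)) (tail.headD 0 + pvDelta)) :: tail
        = pvNewCol ch base (l2.drop k) (prev.drop k) := by
      rw [List.drop_eq_getElem_cons hkl, pvNewCol]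
      simp only [List.tail_drop, pvHeadD_drop, htail]
      rw [List.getD_eq_getElem l2 ' ' hkl]
    rw [hcons]
    exact ih (by omega) (pre.take k) (by simp [List.length_take]; omega)
def pvColAll_cons (l2 : List Char) (a : Char) (s : List Char) :
    pvColAll l2 (a :: s) = pvNewCol a (((s.length : Int) + 1) * pvDelta) l2 (pvColAll l2 s) := rfl

def pvColAll_nil (l2 : List Char) :
    pvColAll l2 [] = (List.range (l2.length + 1)).map
      (fun (j : Nat) => ((l2.length : Int) - (j : Int)) * pvDelta) := rfl

theorem pvColAll_drop_cons (l1 l2 : List Char) (i : Nat) (hi : i < l1.length) :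
    pvColAll l2 (l1.drop i)
      = pvNewCol l1[i] (((l1.length : Int) - (i : Int)) * pvDelta) l2 (pvColAll l2 (l1.drop (i + 1))) := by
  rw [List.drop_eq_getElem_cons hi, pvColAll_cons]
  have hb : (((l1.drop (i+1)).length : Int) + 1) = ((l1.length : Int) - (i : Int)) := by
    simp [List.length_drop]; omega
  rw [hb]

theorem pvOuterA (l1 l2 : List Char) :
    ∀ (i : Nat), i ≤ l1.length → ∀ (curr : List Int), curr.length = l2.length + 1 →
    ((PySem.List.pyRange ((i : Int) - 1) (-1) (-1)).foldl
      (fun (st : List Int × List Int) i =>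
        ((PySem.List.pyRange ((l2.length : Int) - 1) (-1) (-1)).foldl
          (fun (curr_col : List Int) j =>
            PySem.List.pySetD curr_col j (min (min
              (PySem.List.pyGetD st.1 (j + 1) 0 +
                pvAlphaGet (PySem.List.pyGetD l1 i ' ') (PySem.List.pyGetD l2 j ' '))
              (PySem.List.pyGetD st.1 j 0 + pvDelta))
              (PySem.List.pyGetD curr_col (j + 1) 0 + pvDelta)))
          (PySem.List.pySetD st.2 (l2.length : Int) (((l1.length : Int) - i) * pvDelta)),
         st.1))
      (pvColAll l2 (l1.drop i), curr)).1 = pvColAll l2 l1 := by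
  intro i
  induction i with
  | zero =>
    intro _ curr _
    have h0 : PySem.List.pyRange (((0 : Nat) : Int) - 1) (-1) (-1) = [] :=
      PySem.List.pyRange_neg_one_eq_nil (by norm_num)
    rw [h0]
    rfl
  | succ i ih =>
    intro hi curr hcurr
    have hc1 : ((i + 1 : Nat) : Int) - 1 = (i : Int) := by push_cast; ring
    rw [hc1]
    rw [show PySem.List.pyRange (i : Int) (-1) (-1)
          = (i : Int) :: PySem.List.pyRange ((i : Int) - 1) (-1) (-1)
        from PySem.List.pyRange_neg_one_cons (by omega), List.foldl_cons]
    have hil : i < l1.length := by omega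
    have hch : PySem.List.pyGetD l1 (i : Int) ' ' = l1[i] := by
      rw [PySem.List.pyGetD_natCast]; exact List.getD_eq_getElem _ _ hil
    set P := pvColAll l2 (l1.drop (i + 1)) with hP
    have hPlen : P.length = l2.length + 1 := by rw [hP]; exact pvColAll_length _ _
    have hset : PySem.List.pySetD curr (l2.length : Int) (((l1.length : Int) - (i : Int)) * pvDelta)
        = curr.take l2.length ++
          pvNewCol (PySem.List.pyGetD l1 (i : Int) ' ') (((l1.length : Int) - (i : Int)) * pvDelta)
            (l2.drop l2.length) (P.drop l2.length) := by
      rw [PySem.List.pySetD_natCast, List.set_eq_take_cons_drop _ (by omega), List.drop_length]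
      have h2 : curr.drop (l2.length + 1) = [] := List.drop_eq_nil_of_le (by omega)
      rw [h2]
      rfl
    have hstep : ((PySem.List.pyRange ((l2.length : Int) - 1) (-1) (-1)).foldl
          (fun (curr_col : List Int) j =>
            PySem.List.pySetD curr_col j (min (min
              (PySem.List.pyGetD (P, curr).1 (j + 1) 0 +
                pvAlphaGet (PySem.List.pyGetD l1 (i : Int) ' ') (PySem.List.pyGetD l2 j ' '))
              (PySem.List.pyGetD (P, curr).1 j 0 + pvDelta))
              (PySem.List.pyGetD curr_col (j + 1) 0 + pvDelta)))
          (PySem.List.pySetD (P, curr).2 (l2.length : Int)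
            (((l1.length : Int) - (i : Int)) * pvDelta)),
         (P, curr).1)
        = (pvColAll l2 (l1.drop i), P) := by
      show ((PySem.List.pyRange ((l2.length : Int) - 1) (-1) (-1)).foldl
          (fun (curr_col : List Int) j =>
            PySem.List.pySetD curr_col j (min (min
              (PySem.List.pyGetD P (j + 1) 0 +
                pvAlphaGet (PySem.List.pyGetD l1 (i : Int) ' ') (PySem.List.pyGetD l2 j ' '))
              (PySem.List.pyGetD P j 0 + pvDelta))
              (PySem.List.pyGetD curr_col (j + 1) 0 + pvDelta)))
          (PySem.List.pySetD curr (l2.length : Int)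
            (((l1.length : Int) - (i : Int)) * pvDelta)),
         P) = (pvColAll l2 (l1.drop i), P)
      simp only [Prod.mk.injEq]
      refine ⟨?_, trivial⟩
      rw [hset]
      refine (pvInnerA l2 P (PySem.List.pyGetD l1 (i : Int) ' ')
        (((l1.length : Int) - (i : Int)) * pvDelta) hPlen l2.length (le_refl _)
        (curr.take l2.length) (by simp [List.length_take]; omega)).trans ?_
      rw [hch, hP, ← pvColAll_drop_cons l1 l2 i hil]
    rw [hstep]
    exact ih (by omega) P hPlen

-- ===== B side =====
theorem pvRowsGetD (l2 : List Char) (keys : List Char) (c : Char) (d : PySem.Dict Char (List Int)) :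
    (keys.foldl (fun d c => d.insert c (l2.map (fun b => pvAlphaGet c b))) d).getD c []
      = if c ∈ keys then l2.map (fun b => pvAlphaGet c b) else d.getD c [] := by
  induction keys generalizing d with
  | nil => simp
  | cons k rest ih =>
    rw [List.foldl_cons, ih]
    by_cases hc : c ∈ rest
    · simp [hc, List.mem_cons]
    · by_cases hk : c = k
      · subst hk
        simp [hc, PySem.Dict.getD_insert_self]
      · simp [hc, hk, PySem.Dict.getD_insert]

def pvT (c : Char) (bs : List Char) (col : List Int) : List Int :=
  ((bs.map (fun b => pvAlphaGet c b)).zip (col.zip col.tail)).map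
    (fun p => min (p.2.2 + p.1) (p.2.1 + pvDelta))

theorem pvScanB (c : Char) (base : Int) :
    ∀ (bs : List Char) (col : List Int), col.length = bs.length + 1 →
    (pvT c bs col).reverse.foldl
      (fun (st : Int × List Int) x => (min x (st.1 + pvDelta), st.2 ++ [min x (st.1 + pvDelta)]))
      (base, [base])
    = ((pvNewCol c base bs col).headD 0, (pvNewCol c base bs col).reverse) := by
  intro bs
  induction bs with
  | nil =>
    intro col _
    simp [pvT, pvNewCol]
  | cons b bs ih =>
    intro col hcol
    match col, hcol with
    | x :: col', hcol =>
    match col', hcol with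
    | y :: rest, hcol =>
    have ht : pvT c (b :: bs) (x :: y :: rest)
        = min (y + pvAlphaGet c b) (x + pvDelta) :: pvT c bs (y :: rest) := by
      simp [pvT]
    rw [ht, List.reverse_cons, List.foldl_append,
        ih (y :: rest) (by simpa using hcol), List.foldl_cons, List.foldl_nil]
    rw [pvNewCol]
    simp only [List.tail_cons, List.headD_cons, List.reverse_cons]

theorem pvOuterB (l1 l2 : List Char) :
    ∀ (i : Nat), i ≤ l1.length →
    ((PySem.List.pyRange ((i : Int) - 1) (-1) (-1)).foldl
      (fun (col : List Int) i =>
        (PySem.List.slice?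
          ((((((PySem.Set.ofList l1).foldl
                (fun d c => d.insert c (l2.map (fun b => pvAlphaGet c b)))
                PySem.Dict.empty).getD (PySem.List.pyGetD l1 i ' ') []).zip
              (col.zip (PySem.List.slice col (some 1) none))).map
            (fun p => min (p.2.2 + p.1) (p.2.1 + pvDelta))).reverse.foldl
              (fun (st : Int × List Int) x => (min x (st.1 + pvDelta), st.2 ++ [min x (st.1 + pvDelta)]))
              (((l1.length : Int) - i) * pvDelta, [((l1.length : Int) - i) * pvDelta])).2
          none none (-1)).getD [])
      (pvColAll l2 (l1.drop i))) = pvColAll l2 l1 := by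
  intro i
  induction i with
  | zero =>
    intro _
    have h0 : PySem.List.pyRange (((0 : Nat) : Int) - 1) (-1) (-1) = [] :=
      PySem.List.pyRange_neg_one_eq_nil (by norm_num)
    rw [h0]
    rfl
  | succ i ih =>
    intro hi
    have hc1 : ((i + 1 : Nat) : Int) - 1 = (i : Int) := by push_cast; ring
    rw [hc1]
    rw [show PySem.List.pyRange (i : Int) (-1) (-1)
          = (i : Int) :: PySem.List.pyRange ((i : Int) - 1) (-1) (-1)
        from PySem.List.pyRange_neg_one_cons (by omega), List.foldl_cons]
    have hil : i < l1.length := by omega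
    have hch : PySem.List.pyGetD l1 (i : Int) ' ' = l1[i] := by
      rw [PySem.List.pyGetD_natCast]; exact List.getD_eq_getElem _ _ hil
    set P := pvColAll l2 (l1.drop (i + 1)) with hP
    have hPlen : P.length = l2.length + 1 := by rw [hP]; exact pvColAll_length _ _
    have hrow : (((PySem.Set.ofList l1).foldl
          (fun d c => d.insert c (l2.map (fun b => pvAlphaGet c b)))
          PySem.Dict.empty).getD (PySem.List.pyGetD l1 (i : Int) ' ') [])
        = l2.map (fun b => pvAlphaGet l1[i] b) := by
      rw [hch, pvRowsGetD l2 (PySem.Set.ofList l1) l1[i] PySem.Dict.empty,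
          if_pos (by rw [PySem.Set.mem_ofList]; exact List.getElem_mem hil)]
    have hslice : PySem.List.slice P (some 1) none = P.tail := PySem.List.slice_from_one P
    have hstep : (PySem.List.slice?
          ((((((PySem.Set.ofList l1).foldl
                (fun d c => d.insert c (l2.map (fun b => pvAlphaGet c b)))
                PySem.Dict.empty).getD (PySem.List.pyGetD l1 (i : Int) ' ') []).zip
              (P.zip (PySem.List.slice P (some 1) none))).map
            (fun p => min (p.2.2 + p.1) (p.2.1 + pvDelta))).reverse.foldl
              (fun (st : Int × List Int) x => (min x (st.1 + pvDelta), st.2 ++ [min x (st.1 + pvDelta)]))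
              (((l1.length : Int) - (i : Int)) * pvDelta,
               [((l1.length : Int) - (i : Int)) * pvDelta])).2
          none none (-1)).getD []
        = pvColAll l2 (l1.drop i) := by
      rw [hrow, hslice]
      rw [show ((l2.map (fun b => pvAlphaGet l1[i] b)).zip (P.zip P.tail)).map
            (fun p => min (p.2.2 + p.1) (p.2.1 + pvDelta)) = pvT l1[i] l2 P from rfl]
      rw [pvScanB l1[i] (((l1.length : Int) - (i : Int)) * pvDelta) l2 P hPlen]
      rw [PySem.List.slice?_none_none_neg_one]
      simp only [Option.getD_some, List.reverse_reverse]
      rw [hP, ← pvColAll_drop_cons l1 l2 i hil]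
    rw [hstep]
    exact ih (by omega)

theorem pvA_eq (s1 s2 : String) : compute_costs_backward s1 s2 = pvColAll s2.toList s1.toList := by
  have h1 : (PySem.List.pyRange (s2.toList.length : Int) (-1) (-1)).map (fun j => j * pvDelta)
      = pvColAll s2.toList (s1.toList.drop s1.toList.length) := by
    rw [List.drop_length, PySem.List.pyRange_neg_one]
    have ht : ((s2.toList.length : Int) - (-1)).toNat = s2.toList.length + 1 := by omega
    rw [ht, List.map_map, pvColAll_nil]
    apply List.map_congr_left
    intro k _
    simp
  have h2 : (PySem.List.pyRepeat [(0 : Int)] ((s2.toList.length : Int) + 1)).length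
      = s2.toList.length + 1 := by
    rw [PySem.List.pyRepeat_singleton]
    simp
  show ((PySem.List.pyRange ((s1.toList.length : Int) - 1) (-1) (-1)).foldl
      (fun (st : List Int × List Int) i =>
        ((PySem.List.pyRange ((s2.toList.length : Int) - 1) (-1) (-1)).foldl
          (fun (curr_col : List Int) j =>
            PySem.List.pySetD curr_col j (min (min
              (PySem.List.pyGetD st.1 (j + 1) 0 +
                pvAlphaGet (PySem.List.pyGetD s1.toList i ' ') (PySem.List.pyGetD s2.toList j ' '))
              (PySem.List.pyGetD st.1 j 0 + pvDelta))
              (PySem.List.pyGetD curr_col (j + 1) 0 + pvDelta)))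
          (PySem.List.pySetD st.2 (s2.toList.length : Int)
            (((s1.toList.length : Int) - i) * pvDelta)),
         st.1))
      ((PySem.List.pyRange (s2.toList.length : Int) (-1) (-1)).map (fun j => j * pvDelta),
       PySem.List.pyRepeat [(0 : Int)] ((s2.toList.length : Int) + 1))).1
    = pvColAll s2.toList s1.toList
  rw [h1]
  exact pvOuterA s1.toList s2.toList s1.toList.length (le_refl _) _ h2

theorem pvB_eq (s1 s2 : String) : compute_costs_backward_alt s1 s2 = pvColAll s2.toList s1.toList := by
  have h1 : (PySem.List.pyRange 0 ((s2.toList.length : Int) + 1) 1).map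
        (fun j => ((s2.toList.length : Int) - j) * pvDelta)
      = pvColAll s2.toList (s1.toList.drop s1.toList.length) := by
    rw [List.drop_length, PySem.List.pyRange_one]
    have ht : ((s2.toList.length : Int) + 1 - 0).toNat = s2.toList.length + 1 := by omega
    rw [ht, List.map_map, pvColAll_nil]
    apply List.map_congr_left
    intro k _
    simp
  show ((PySem.List.pyRange ((s1.toList.length : Int) - 1) (-1) (-1)).foldl
      (fun (col : List Int) i =>
        (PySem.List.slice?
          ((((((PySem.Set.ofList s1.toList).foldl
                (fun d c => d.insert c (s2.toList.map (fun b => pvAlphaGet c b)))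
                PySem.Dict.empty).getD (PySem.List.pyGetD s1.toList i ' ') []).zip
              (col.zip (PySem.List.slice col (some 1) none))).map
            (fun p => min (p.2.2 + p.1) (p.2.1 + pvDelta))).reverse.foldl
              (fun (st : Int × List Int) x => (min x (st.1 + pvDelta), st.2 ++ [min x (st.1 + pvDelta)]))
              (((s1.toList.length : Int) - i) * pvDelta,
               [((s1.toList.length : Int) - i) * pvDelta])).2
          none none (-1)).getD [])
      ((PySem.List.pyRange 0 ((s2.toList.length : Int) + 1) 1).map
        (fun j => ((s2.toList.length : Int) - j) * pvDelta)))
    = pvColAll s2.toList s1.toList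
  rw [h1]
  exact pvOuterB s1.toList s2.toList s1.toList.length (le_refl _)

-- ===== VERDICT (by name: the statement is the Claim_ definition above) =====
theorem compute_costs_backward_spec : Claim_equal_compute_costs_backward := by
  intro s1 s2 _ _
  unfold Spec_compute_costs_backward
  exact (pvA_eq s1 s2).trans (pvB_eq s1 s2).symm
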